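-- pv_equiv track=rewrite | github.com/jiyoungzero/2023-Codingtest-Study | jiyoung풀이/boj_9037Thecandywar.py | teacher
-- ===== SOURCE A (Python) =====
-- def teacher(n, candy):
--     tmp_lst = [0 for i in range(n)]
--     for idx in range(n):
--         if candy[idx] % 2 :
--             candy[idx] += 1
--         candy[idx] //= 2
--
--         tmp_lst[(idx+1) % n] = candy[idx]
--
--     for idx in range(n):
--         candy[idx] += tmp_lst[idx]
--     return candy
-- ===== SOURCE B (Python) =====
-- def teacher(n, candy):
--     if n <= 0:
--         return candy
--     last = (candy[n - 1] + 1) // 2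
--     for i in range(n):
--         cur = (candy[i] + 1) // 2
--         candy[i] = cur + last
--         last = cur
--     return candy
-- ===== Notes on version B (the rewrite author's own statement) =====
-- stated objective: faster
-- what changed: Single pass with one rolling scalar (the previous ceil-halved value, seeded from the last child) replaces A's two passes over the list and its O(n) temporary buffer.
import Mathlib
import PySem

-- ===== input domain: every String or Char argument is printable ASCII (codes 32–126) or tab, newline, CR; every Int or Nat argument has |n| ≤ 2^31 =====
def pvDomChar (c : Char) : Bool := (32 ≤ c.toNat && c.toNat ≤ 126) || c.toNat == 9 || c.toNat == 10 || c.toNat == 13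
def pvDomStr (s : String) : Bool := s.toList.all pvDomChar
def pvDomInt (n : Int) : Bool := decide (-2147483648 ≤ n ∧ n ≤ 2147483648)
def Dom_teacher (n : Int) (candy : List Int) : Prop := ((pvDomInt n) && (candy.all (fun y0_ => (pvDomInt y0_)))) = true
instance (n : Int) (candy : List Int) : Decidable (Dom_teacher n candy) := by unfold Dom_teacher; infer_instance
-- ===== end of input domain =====

-- B replaces A's two passes and O(n) temporary buffer by a single pass with one rolling scalar (alternative decomposition, same O(n) time; return value only — both Pythons also mutate `candy` in place, identically).


-- ===== PORT A =====
def teacher (n : Int) (candy : List Int) : List Int :=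
  let tmp0 : List Int := (PySem.List.pyRange 0 n 1).map (fun _ => (0 : Int))
  let st := (PySem.List.pyRange 0 n 1).foldl (fun (st : List Int × List Int) idx =>
    let candy := st.1
    let tmp := st.2
    let candy := if PySem.Int.mod (PySem.List.pyGetD candy idx 0) 2 ≠ 0 then
        PySem.List.pySetD candy idx (PySem.List.pyGetD candy idx 0 + 1) else candy
    let candy := PySem.List.pySetD candy idx (PySem.Int.floordiv (PySem.List.pyGetD candy idx 0) 2)
    let tmp := PySem.List.pySetD tmp (PySem.Int.mod (idx + 1) n) (PySem.List.pyGetD candy idx 0)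
    (candy, tmp)) (candy, tmp0)
  (PySem.List.pyRange 0 n 1).foldl (fun candy idx =>
    PySem.List.pySetD candy idx (PySem.List.pyGetD candy idx 0 + PySem.List.pyGetD st.2 idx 0)) st.1

-- ===== PORT B =====
def teacher_alt (n : Int) (candy : List Int) : List Int :=
  if n ≤ 0 then candy
  else
    let last := PySem.Int.floordiv (PySem.List.pyGetD candy (n - 1) 0 + 1) 2
    ((PySem.List.pyRange 0 n 1).foldl (fun (st : List Int × Int) i =>
      let cur := PySem.Int.floordiv (PySem.List.pyGetD st.1 i 0 + 1) 2
      (PySem.List.pySetD st.1 i (cur + st.2), cur)) (candy, last)).1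

-- ===== PRECONDITION & SPEC =====
-- Pre_ excludes exactly the inputs where the Python A raises IndexError (n larger than the list).
def Pre_teacher (n : Int) (candy : List Int) : Prop := n ≤ (candy.length : Int)
instance (n : Int) (candy : List Int) : Decidable (Pre_teacher n candy) := by unfold Pre_teacher; infer_instance
def pvWitness_teacher : Int × List Int := (3, [5, 2, 7])
def Spec_teacher (n : Int) (candy : List Int) (out : List Int) : Prop := out = teacher_alt n candy
instance (n : Int) (candy : List Int) (out : List Int) : Decidable (Spec_teacher n candy out) := by unfold Spec_teacher; infer_instance

-- ===== CLAIM (what is proved, stated in full; the proofs are below) =====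
def Claim_equal_teacher : Prop := ∀ (n : Int) (candy : List Int), Dom_teacher n candy → Pre_teacher n candy → Spec_teacher n candy (teacher n candy)

-- ===== LEMMAS AND PROOFS =====

-- ceil-halving, the per-element operation both programs perform
def pvH (c : Int) : Int := PySem.Int.floordiv (c + 1) 2

-- functional representation of a length-`len` list
def pvRep (f : Nat → Int) (len : Nat) : List Int := (List.range len).map f

theorem pvRep_congr {f g : Nat → Int} {len : Nat} (h : ∀ j < len, f j = g j) :
    pvRep f len = pvRep g len := by
  unfold pvRep
  apply List.ext_getElem (by simp)
  intro j hj _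
  simpa using h j (by simpa using hj)

theorem pvRep_pyGetD {f : Nat → Int} {len m : Nat} (hm : m < len) :
    PySem.List.pyGetD (pvRep f len) ((m : Nat) : Int) 0 = f m := by
  rw [PySem.List.pyGetD_natCast]
  unfold pvRep
  rw [List.getD_eq_getElem?_getD]
  simp [hm]

theorem pvRep_pySetD {f : Nat → Int} {len m : Nat} (v : Int) :
    PySem.List.pySetD (pvRep f len) ((m : Nat) : Int) v
      = pvRep (fun j => if j = m then v else f j) len := by
  rw [PySem.List.pySetD_natCast]
  unfold pvRep
  apply List.ext_getElem (by simp)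
  intro j hj _
  simp only [List.getElem_set, List.getElem_map, List.getElem_range]
  rcases eq_or_ne m j with h | h
  · subst h; simp
  · simp [h, Ne.symm h]

theorem pvRep_self (xs : List Int) : xs = pvRep (fun j => xs.getD j 0) xs.length := by
  unfold pvRep
  apply List.ext_getElem (by simp)
  intro j hj _
  simp [List.getD_eq_getElem?_getD, List.getElem?_eq_getElem hj]

-- A's parity branch followed by floor halving equals ceil halving
theorem pvH_eq (c : Int) :
    PySem.Int.floordiv (if PySem.Int.mod c 2 ≠ 0 then c + 1 else c) 2 = pvH c := by
  unfold pvH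
  rw [PySem.Int.mod_eq_emod_of_pos (show (0:Int) < 2 by norm_num)]
  split_ifs with h
  · rfl
  · rw [not_ne_iff] at h
    rw [PySem.Int.floordiv_eq_ediv_of_pos (show (0:Int) < 2 by norm_num),
        PySem.Int.floordiv_eq_ediv_of_pos (show (0:Int) < 2 by norm_num)]
    omega

-- contents of A's temp buffer after m steps of the first loop
def pvT (f : Nat → Int) (N m : Nat) : Nat → Int := fun k =>
  if k = 0 then (if m = N then pvH (f (N - 1)) else 0)
  else if k ≤ m then pvH (f (k - 1)) else 0

theorem pv_loop1 (f : Nat → Int) (len N : Nat) (hN : 0 < N) (hlen : N ≤ len) :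
    ∀ m : Nat, m ≤ N →
    (PySem.List.pyRange 0 (m : Int) 1).foldl (fun (st : List Int × List Int) idx =>
      ((PySem.List.pySetD
          (if PySem.Int.mod (PySem.List.pyGetD st.1 idx 0) 2 ≠ 0 then
              PySem.List.pySetD st.1 idx (PySem.List.pyGetD st.1 idx 0 + 1) else st.1) idx
          (PySem.Int.floordiv (PySem.List.pyGetD
            (if PySem.Int.mod (PySem.List.pyGetD st.1 idx 0) 2 ≠ 0 then
                PySem.List.pySetD st.1 idx (PySem.List.pyGetD st.1 idx 0 + 1) else st.1) idx 0) 2)),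
       (PySem.List.pySetD st.2 (PySem.Int.mod (idx + 1) (N : Int))
          (PySem.List.pyGetD (PySem.List.pySetD
            (if PySem.Int.mod (PySem.List.pyGetD st.1 idx 0) 2 ≠ 0 then
                PySem.List.pySetD st.1 idx (PySem.List.pyGetD st.1 idx 0 + 1) else st.1) idx
            (PySem.Int.floordiv (PySem.List.pyGetD
              (if PySem.Int.mod (PySem.List.pyGetD st.1 idx 0) 2 ≠ 0 then
                  PySem.List.pySetD st.1 idx (PySem.List.pyGetD st.1 idx 0 + 1) else st.1) idx 0) 2)) idx 0))))
      (pvRep f len, pvRep (fun _ => 0) N)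
    = (pvRep (fun j => if j < m then pvH (f j) else f j) len, pvRep (pvT f N m) N) := by
  intro m
  induction m with
  | zero =>
    intro _
    rw [show ((0 : Nat) : Int) = 0 by norm_num, PySem.List.pyRange_one_eq_nil (by norm_num)]
    simp only [List.foldl_nil, Prod.mk.injEq]
    refine ⟨pvRep_congr (fun j _ => by simp), pvRep_congr (fun k hk => ?_)⟩
    unfold pvT
    split_ifs <;> first | rfl | (exfalso; omega)
  | succ m ih =>
    intro hm1
    have hm : m ≤ N := Nat.le_of_succ_le hm1
    have hmN : m < N := hm1
    have hmlen : m < len := lt_of_lt_of_le hmN hlen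
    have hcast : ((m + 1 : Nat) : Int) = (m : Int) + 1 := by push_cast; ring
    rw [hcast, PySem.List.pyRange_one_succ_right (by positivity), List.foldl_append, ih hm]
    simp only [List.foldl_cons, List.foldl_nil]
    set g : Nat → Int := fun j => if j < m then pvH (f j) else f j with hg
    have hgm : g m = f m := by simp [hg]
    have hget1 : PySem.List.pyGetD (pvRep g len) ((m : Nat) : Int) 0 = f m := by
      rw [pvRep_pyGetD hmlen]; exact hgm
    rw [hget1]
    have hcandy :
        PySem.List.pySetD
          (if PySem.Int.mod (f m) 2 ≠ 0 then
              PySem.List.pySetD (pvRep g len) ((m : Nat) : Int) (f m + 1)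
            else pvRep g len) ((m : Nat) : Int)
          (PySem.Int.floordiv (PySem.List.pyGetD
            (if PySem.Int.mod (f m) 2 ≠ 0 then
                PySem.List.pySetD (pvRep g len) ((m : Nat) : Int) (f m + 1)
              else pvRep g len) ((m : Nat) : Int) 0) 2)
        = pvRep (fun j => if j = m then pvH (f m) else g j) len := by
      split_ifs with hodd
      · rw [pvRep_pySetD]
        have hget2 : PySem.List.pyGetD (pvRep (fun j => if j = m then f m + 1 else g j) len) ((m : Nat) : Int) 0 = f m + 1 := by
          rw [pvRep_pyGetD hmlen]; simp
        rw [hget2, pvRep_pySetD]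
        have hv := pvH_eq (f m); rw [if_pos hodd] at hv
        rw [hv]
        exact pvRep_congr (fun j _ => by by_cases h : j = m <;> simp [h])
      · rw [hget1, pvRep_pySetD]
        have hv := pvH_eq (f m); rw [if_neg hodd] at hv
        rw [hv]
    rw [hcandy]
    have hget3 : PySem.List.pyGetD (pvRep (fun j => if j = m then pvH (f m) else g j) len) ((m : Nat) : Int) 0 = pvH (f m) := by
      rw [pvRep_pyGetD hmlen]; simp
    rw [hget3]
    have hmodcast : ((m : Nat) : Int) + 1 = (((m + 1 : Nat)) : Int) := by push_cast; ring
    refine Prod.ext ?_ ?_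
    · refine pvRep_congr (fun j _ => ?_)
      by_cases h : j = m
      · subst h; simp
      · simp only [hg]
        by_cases h2 : j < m
        · simp [h, h2, Nat.lt_succ_of_lt h2]
        · have h3 : ¬ j < m + 1 := by omega
          simp [h, h2, h3]
    · by_cases hEnd : m + 1 = N
      · have hmod : PySem.Int.mod (((m : Nat) : Int) + 1) (N : Int) = ((0 : Nat) : Int) := by
          rw [hmodcast, hEnd, PySem.Int.mod_eq_emod_of_pos (show (0:Int) < (N : Int) by exact_mod_cast Nat.pos_of_ne_zero (by omega))]
          simp
        rw [hmod, pvRep_pySetD]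
        refine pvRep_congr (fun k hk => ?_)
        unfold pvT
        split_ifs <;>
          first | rfl | (exfalso; omega) | (congr 1; congr 1; omega)
      · have hmod : PySem.Int.mod (((m : Nat) : Int) + 1) (N : Int) = (((m + 1 : Nat)) : Int) := by
          rw [hmodcast, PySem.Int.mod_eq_emod_of_pos (show (0:Int) < (N : Int) by exact_mod_cast Nat.pos_of_ne_zero (by omega))]
          exact Int.emod_eq_of_lt (by positivity) (by exact_mod_cast (show m + 1 < N by omega))
        rw [hmod, pvRep_pySetD]
        refine pvRep_congr (fun k hk => ?_)
        unfold pvT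
        split_ifs <;>
          first | rfl | (exfalso; omega) | (congr 1; congr 1; omega)

-- A's second loop adds the temp buffer pointwise
theorem pv_loop2 (g t : Nat → Int) (len N : Nat) (hlen : N ≤ len) :
    ∀ m : Nat, m ≤ N →
    (PySem.List.pyRange 0 (m : Int) 1).foldl (fun candy idx =>
      PySem.List.pySetD candy idx (PySem.List.pyGetD candy idx 0 + PySem.List.pyGetD (pvRep t N) idx 0)) (pvRep g len)
    = pvRep (fun j => if j < m then g j + t j else g j) len := by
  intro m
  induction m with
  | zero =>
    intro _
    rw [show ((0 : Nat) : Int) = 0 by norm_num, PySem.List.pyRange_one_eq_nil (by norm_num)]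
    simp only [List.foldl_nil]
    exact pvRep_congr (fun j _ => by simp)
  | succ m ih =>
    intro hm1
    have hm : m ≤ N := Nat.le_of_succ_le hm1
    have hmN : m < N := hm1
    have hmlen : m < len := lt_of_lt_of_le hmN hlen
    have hcast : ((m + 1 : Nat) : Int) = (m : Int) + 1 := by push_cast; ring
    rw [hcast, PySem.List.pyRange_one_succ_right (by positivity), List.foldl_append, ih hm]
    simp only [List.foldl_cons, List.foldl_nil]
    rw [pvRep_pyGetD hmlen, pvRep_pyGetD hmN, pvRep_pySetD]
    simp only [lt_self_iff_false, if_false]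
    refine pvRep_congr (fun j _ => ?_)
    by_cases h : j = m
    · subst h; simp
    · by_cases h2 : j < m
      · simp [h, h2, Nat.lt_succ_of_lt h2]
      · have h3 : ¬ j < m + 1 := by omega
        simp [h, h2, h3]

-- B's single pass with the rolling scalar
theorem pv_loopB (f : Nat → Int) (len N : Nat) (L0 : Int) (hlen : N ≤ len) :
    ∀ m : Nat, m ≤ N →
    (PySem.List.pyRange 0 (m : Int) 1).foldl (fun (st : List Int × Int) i =>
      (PySem.List.pySetD st.1 i (PySem.Int.floordiv (PySem.List.pyGetD st.1 i 0 + 1) 2 + st.2),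
       PySem.Int.floordiv (PySem.List.pyGetD st.1 i 0 + 1) 2)) (pvRep f len, L0)
    = (pvRep (fun j => if j < m then pvH (f j) + (if j = 0 then L0 else pvH (f (j - 1))) else f j) len,
       if m = 0 then L0 else pvH (f (m - 1))) := by
  intro m
  induction m with
  | zero =>
    intro _
    rw [show ((0 : Nat) : Int) = 0 by norm_num, PySem.List.pyRange_one_eq_nil (by norm_num)]
    simp only [List.foldl_nil, Prod.mk.injEq]
    exact ⟨pvRep_congr (fun j _ => by simp), rfl⟩
  | succ m ih =>
    intro hm1
    have hm : m ≤ N := Nat.le_of_succ_le hm1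
    have hmlen : m < len := lt_of_lt_of_le hm1 hlen
    have hcast : ((m + 1 : Nat) : Int) = (m : Int) + 1 := by push_cast; ring
    rw [hcast, PySem.List.pyRange_one_succ_right (by positivity), List.foldl_append, ih hm]
    simp only [List.foldl_cons, List.foldl_nil]
    rw [pvRep_pyGetD hmlen]
    simp only [lt_self_iff_false, if_false]
    rw [pvRep_pySetD]
    refine Prod.ext ?_ ?_
    · refine pvRep_congr (fun j _ => ?_)
      by_cases h : j = m
      · subst h; simp [pvH]
      · by_cases h2 : j < m
        · simp [h, h2, Nat.lt_succ_of_lt h2]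
        · have h3 : ¬ j < m + 1 := by omega
          simp [h, h2, h3]
    · simp [pvH]

-- ===== VERDICT (by name: the statement is the Claim_ definition above) =====
theorem teacher_spec : Claim_equal_teacher := by
  intro n candy _ hpre
  simp only [Spec_teacher, teacher, teacher_alt]
  by_cases hn : n ≤ 0
  · rw [PySem.List.pyRange_one_eq_nil hn]
    simp [hn]
  · rw [not_le] at hn
    rw [if_neg (not_le.mpr hn)]
    have hpre' : n ≤ (candy.length : Int) := hpre
    lift n to Nat using hn.le with N hN
    have hNpos : 0 < N := by exact_mod_cast hn
    have hNlen : N ≤ candy.length := by exact_mod_cast hpre'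
    set len := candy.length with hlendef
    set f : Nat → Int := fun j => candy.getD j 0 with hf
    have hcandy : candy = pvRep f len := pvRep_self candy
    have htmp0 : (PySem.List.pyRange 0 (N : Int) 1).map (fun _ => (0 : Int)) = pvRep (fun _ => 0) N := by
      apply List.ext_getElem
      · simp [PySem.List.length_pyRange_one, pvRep]
      · intro j h1 h2
        simp [pvRep]
    have hlast : PySem.Int.floordiv (PySem.List.pyGetD candy ((N : Int) - 1) 0 + 1) 2 = pvH (f (N - 1)) := by
      rw [show ((N : Int) - 1) = (((N - 1 : Nat)) : Int) by omega, hcandy,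
          pvRep_pyGetD (by omega)]
      rfl
    rw [hlast, hcandy, htmp0]
    rw [pv_loop1 f len N hNpos hNlen N le_rfl]
    rw [pv_loopB f len N (pvH (f (N - 1))) hNlen N le_rfl]
    simp only []
    rw [pv_loop2 (fun j => if j < N then pvH (f j) else f j) (pvT f N N) len N hNlen N le_rfl]
    refine pvRep_congr (fun j hj => ?_)
    unfold pvT
    by_cases hjN : j < N
    · by_cases hj0 : j = 0
      · subst hj0; simp [hjN]
      · simp [hjN, hj0, show j ≤ N by omega]
    · simp [hjN]
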